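-- pv_equiv track=rewrite | github.com/alan-turing-institute/cribbage-rl | mcagent/mcagent.py | four_card_fifteens
-- ===== SOURCE A (Python) =====
-- from itertools import combinations
--
-- def peg_val(card):
--     return 10 if card[0]>10 else card[0]
--
-- def four_card_fifteens(sorted5cards):
--     """
--     Returns the point value of 4 cards that sum to 15
--     :param sorted5cards: sorted list of 4 cards in the player's hand and the cut card
--     :return: points from four card 15's
--     """
--     points=0
--     index_combinations4 = combinations([0, 1, 2, 3, 4], 4)
--     for combination in list(index_combinations4):
--         card1 = sorted5cards[combination[0]]
--         value1 = peg_val(card1)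
--         card2 = sorted5cards[combination[1]]
--         value2 = peg_val(card2)
--         card3 = sorted5cards[combination[2]]
--         value3 = peg_val(card3)
--         card4 = sorted5cards[combination[3]]
--         value4=peg_val(card4)
--         if value1 + value2 + value3 + value4 == 15:
--             points += 2
--     return points
-- ===== SOURCE B (Python) =====
-- def peg_val(card):
--     return 10 if card[0] > 10 else card[0]
--
-- def four_card_fifteens(sorted5cards):
--     total = sum(peg_val(sorted5cards[i]) for i in range(5))
--     points = 0
--     for i in range(5):
--         # the 4-card subset excluding card i sums to total - peg_val(sorted5cards[i])
--         if total - peg_val(sorted5cards[i]) == 15: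
--             points += 2
--     return points
-- ===== Notes on version B (the rewrite author's own statement) =====
-- stated objective: simpler
-- what changed: Replaces enumeration of all five 4-card index combinations with one pass over the excluded card using the complement identity: a 4-card subset sums to 15 iff total - peg_val(excluded card) == 15.
import Mathlib
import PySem

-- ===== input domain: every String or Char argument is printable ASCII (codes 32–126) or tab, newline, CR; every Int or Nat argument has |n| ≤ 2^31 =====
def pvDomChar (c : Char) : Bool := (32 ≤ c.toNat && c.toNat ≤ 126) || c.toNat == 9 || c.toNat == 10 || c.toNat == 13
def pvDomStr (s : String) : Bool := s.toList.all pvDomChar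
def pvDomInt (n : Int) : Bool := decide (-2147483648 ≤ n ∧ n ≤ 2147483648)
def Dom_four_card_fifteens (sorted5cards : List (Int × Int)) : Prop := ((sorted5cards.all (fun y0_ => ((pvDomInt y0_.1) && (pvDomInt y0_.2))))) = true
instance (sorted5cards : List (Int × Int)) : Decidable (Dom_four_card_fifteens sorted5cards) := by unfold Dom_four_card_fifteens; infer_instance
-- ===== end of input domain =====

-- B replaces the enumeration of all five 4-card index combinations by a single pass over the
-- excluded card via the complement identity (subset sum = total - excluded); simpler, not faster.


-- ===== PORT A =====
def pegA (card : Int × Int) : Int := if card.1 > 10 then 10 else card.1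

-- the list produced by combinations([0,1,2,3,4], 4), in itertools order
def pvCombos4 : List (Int × Int × Int × Int) :=
  [(0, 1, 2, 3), (0, 1, 2, 4), (0, 1, 3, 4), (0, 2, 3, 4), (1, 2, 3, 4)]

def four_card_fifteens (sorted5cards : List (Int × Int)) : Int :=
  pvCombos4.foldl (fun points combination =>
    let value1 := pegA (PySem.List.pyGetD sorted5cards combination.1 (0, 0))
    let value2 := pegA (PySem.List.pyGetD sorted5cards combination.2.1 (0, 0))
    let value3 := pegA (PySem.List.pyGetD sorted5cards combination.2.2.1 (0, 0))
    let value4 := pegA (PySem.List.pyGetD sorted5cards combination.2.2.2 (0, 0))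
    if value1 + value2 + value3 + value4 = 15 then points + 2 else points) 0

-- ===== PORT B =====
def pegB (card : Int × Int) : Int := if card.1 > 10 then 10 else card.1

def four_card_fifteens_alt (sorted5cards : List (Int × Int)) : Int :=
  let total := ((PySem.List.pyRange 0 5 1).map
    (fun i => pegB (PySem.List.pyGetD sorted5cards i (0, 0)))).sum
  (PySem.List.pyRange 0 5 1).foldl
    (fun points i =>
      if total - pegB (PySem.List.pyGetD sorted5cards i (0, 0)) = 15 then points + 2 else points) 0

-- ===== PRECONDITION & SPEC =====
-- A indexes positions 0..4, so it raises IndexError on lists with fewer than 5 cards.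
def Pre_four_card_fifteens (sorted5cards : List (Int × Int)) : Prop := 5 ≤ sorted5cards.length
instance (sorted5cards : List (Int × Int)) : Decidable (Pre_four_card_fifteens sorted5cards) := by
  unfold Pre_four_card_fifteens; infer_instance

def pvWitness_four_card_fifteens : (List (Int × Int)) :=
  [(1, 0), (4, 1), (5, 2), (5, 3), (13, 0)]

def Spec_four_card_fifteens (sorted5cards : List (Int × Int)) (out : Int) : Prop := out = four_card_fifteens_alt sorted5cards
instance (sorted5cards : List (Int × Int)) (out : Int) : Decidable (Spec_four_card_fifteens sorted5cards out) := by unfold Spec_four_card_fifteens; infer_instance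

-- ===== CLAIM (what is proved, stated in full; the proofs are below) =====
def Claim_equal_four_card_fifteens : Prop := ∀ (sorted5cards : List (Int × Int)), Dom_four_card_fifteens sorted5cards → Pre_four_card_fifteens sorted5cards → Spec_four_card_fifteens sorted5cards (four_card_fifteens sorted5cards)

-- ===== LEMMAS AND PROOFS =====

-- ===== VERDICT (by name: the statement is the Claim_ definition above) =====
theorem four_card_fifteens_spec : Claim_equal_four_card_fifteens := by
  intro xs _ hpre
  obtain ⟨a, b, c, d, e, rest, hx⟩ : ∃ a b c d e rest, xs = a :: b :: c :: d :: e :: rest := by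
    match xs, hpre with
    | a :: b :: c :: d :: e :: rest, _ => exact ⟨a, b, c, d, e, rest, rfl⟩
  subst hx
  unfold Spec_four_card_fifteens four_card_fifteens four_card_fifteens_alt pvCombos4 pegA pegB
  rw [show PySem.List.pyRange 0 5 1 = [0, 1, 2, 3, 4] from rfl]
  simp only [List.foldl_cons, List.foldl_nil, List.map_cons, List.map_nil,
    List.sum_cons, List.sum_nil, PySem.List.pyGetD_ofNat',
    List.getD_cons_succ, List.getD_cons_zero, add_zero]
  generalize (if a.1 > 10 then (10:Int) else a.1) = p1
  generalize (if b.1 > 10 then (10:Int) else b.1) = p2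
  generalize (if c.1 > 10 then (10:Int) else c.1) = p3
  generalize (if d.1 > 10 then (10:Int) else d.1) = p4
  generalize (if e.1 > 10 then (10:Int) else e.1) = p5
  simp only [show p1 + (p2 + (p3 + (p4 + p5))) - p1 = 15 ↔ p2 + p3 + p4 + p5 = 15 from by omega,
    show p1 + (p2 + (p3 + (p4 + p5))) - p2 = 15 ↔ p1 + p3 + p4 + p5 = 15 from by omega,
    show p1 + (p2 + (p3 + (p4 + p5))) - p3 = 15 ↔ p1 + p2 + p4 + p5 = 15 from by omega,
    show p1 + (p2 + (p3 + (p4 + p5))) - p4 = 15 ↔ p1 + p2 + p3 + p5 = 15 from by omega,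
    show p1 + (p2 + (p3 + (p4 + p5))) - p5 = 15 ↔ p1 + p2 + p3 + p4 = 15 from by omega]
  split_ifs <;> omega
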